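-- pv_equiv track=rewrite | github.com/pypi-data/pypi-mirror-403 | packages/umcp/umcp-1.5.0-py3-none-any.whl/umcp/ss1m_triad.py | encode_base32
-- ===== SOURCE A (Python) =====
-- CROCKFORD_ALPHABET = "0123456789ABCDEFGHJKMNPQRSTVWXYZ"
--
-- def encode_base32(value: int, length: int = 1) -> str:
--     """
--     Encode an integer to Crockford Base32.
--
--     Args:
--         value: Non-negative integer to encode
--         length: Minimum output length (zero-padded)
--
--     Returns:
--         Crockford Base32 string
--     """
--     if value < 0:
--         raise ValueError("Cannot encode negative values")
--
--     if value == 0: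
--         return CROCKFORD_ALPHABET[0] * length
--
--     result: list[str] = []
--     while value > 0:
--         result.append(CROCKFORD_ALPHABET[value % 32])
--         value //= 32
--
--     result.reverse()
--     encoded = "".join(result)
--
--     # Pad to minimum length
--     if len(encoded) < length:
--         encoded = CROCKFORD_ALPHABET[0] * (length - len(encoded)) + encoded
--
--     return encoded
-- ===== SOURCE B (Python) =====
-- CROCKFORD_ALPHABET = "0123456789ABCDEFGHJKMNPQRSTVWXYZ"
--
-- def encode_base32(value: int, length: int = 1) -> str:
--     if value < 0:
--         raise ValueError("Cannot encode negative values")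
--     # exact output width: at least length, and enough for all digits
--     width = max(length, 0)
--     while 32 ** width <= value:
--         width += 1
--     # preallocated zero-filled buffer, digits written right-to-left;
--     # padding and the zero case fall out of the initial fill
--     out = [CROCKFORD_ALPHABET[0]] * width
--     i = width - 1
--     v = value
--     while v > 0:
--         out[i] = CROCKFORD_ALPHABET[v % 32]
--         v //= 32
--         i -= 1
--     return "".join(out)
-- ===== Notes on version B (the rewrite author's own statement) =====
-- stated objective: alternative
-- what changed: Instead of A's append-LSB-then-reverse loop with a separate zero branch and a pad branch, B first computes the exact output width (max of length and the digit count) and then writes the digits right-to-left into a preallocated zero-filled buffer, so zero-padding and the zero case fall out of the initial fill.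
import Mathlib
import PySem

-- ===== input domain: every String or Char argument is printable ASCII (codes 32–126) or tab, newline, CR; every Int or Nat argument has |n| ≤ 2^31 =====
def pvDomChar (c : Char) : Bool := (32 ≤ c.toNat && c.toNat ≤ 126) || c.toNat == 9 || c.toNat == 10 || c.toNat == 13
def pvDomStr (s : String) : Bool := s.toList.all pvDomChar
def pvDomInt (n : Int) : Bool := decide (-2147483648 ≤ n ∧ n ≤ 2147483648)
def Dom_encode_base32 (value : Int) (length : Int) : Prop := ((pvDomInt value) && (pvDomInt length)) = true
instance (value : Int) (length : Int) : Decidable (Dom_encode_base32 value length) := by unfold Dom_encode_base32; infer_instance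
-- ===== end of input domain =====

-- B replaces A's append-then-reverse loop (with its zero branch and pad branch) by a
-- precomputed output width plus a fixed-count digit-prepending loop; alternative decomposition, same cost.


-- ===== PORT A =====
def crockford : List Char := "0123456789ABCDEFGHJKMNPQRSTVWXYZ".toList

-- CROCKFORD_ALPHABET[i]; exact for 0 ≤ i < 32, the only indices either program uses
def crockDigit (i : Int) : Char := PySem.List.pyGetD crockford i ' '

-- the 'while value > 0' loop of A, carrying the growing result list; fuel only makes
-- the recursion structural (value.toNat + 1 always suffices, proved in encLoopA_reverse)
def encLoopA (value : Int) (result : List Char) : Nat → List Char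
  | 0 => result
  | fuel + 1 =>
    if value > 0 then
      encLoopA (PySem.Int.floordiv value 32) (result ++ [crockDigit (PySem.Int.mod value 32)]) fuel
    else result

def encode_base32 (value : Int) (length : Int) : String :=
  if value < 0 then ""  -- A raises ValueError here; excluded by Pre_encode_base32
  else if value = 0 then String.mk (List.replicate length.toNat '0')  -- CROCKFORD_ALPHABET[0] * length
  else
    let encoded := (encLoopA value [] (value.toNat + 1)).reverse
    if (encoded.length : Int) < length then
      String.mk (List.replicate (length - encoded.length).toNat '0' ++ encoded)
    else String.mk encoded

-- ===== PORT B =====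
-- the 'while 32 ** width <= value' loop of B; Python's width = max(length, 0) is
-- represented as a Nat (length.toNat); fuel only makes the recursion structural
-- (value.toNat + 1 always suffices, proved in widthLoopB_eq)
def widthLoopB (value : Int) (w : Nat) : Nat → Nat
  | 0 => w
  | fuel + 1 => if (32 : Int) ^ w ≤ value then widthLoopB value (w + 1) fuel else w

-- out[i] = c; exact for 0 ≤ i < len(out), the only indices B's loop reaches
def pySetChar (xs : List Char) (i : Int) (c : Char) : List Char :=
  if 0 ≤ i ∧ i < (xs.length : Int) then xs.set i.toNat c else xs

-- the 'while v > 0' loop of B: write digit into the buffer at i, v //= 32, i -= 1;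
-- fuel only makes the recursion structural (value.toNat + 1 always suffices)
def fillLoopB (v : Int) (i : Int) (out : List Char) : Nat → List Char
  | 0 => out
  | fuel + 1 =>
    if v > 0 then
      fillLoopB (PySem.Int.floordiv v 32) (i - 1)
        (pySetChar out i (crockDigit (PySem.Int.mod v 32))) fuel
    else out

def encode_base32_alt (value : Int) (length : Int) : String :=
  if value < 0 then ""  -- B raises ValueError here; excluded by Pre_encode_base32
  else
    let width := widthLoopB value length.toNat (value.toNat + 1)
    String.mk (fillLoopB value ((width : Int) - 1) (List.replicate width (crockDigit 0)) (value.toNat + 1))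

-- ===== PRECONDITION & SPEC =====
-- A (and B) raise ValueError exactly on negative value
def Pre_encode_base32 (value : Int) (length : Int) : Prop := 0 ≤ value
instance (value : Int) (length : Int) : Decidable (Pre_encode_base32 value length) := by
  unfold Pre_encode_base32; infer_instance

def pvWitness_encode_base32 : Int × Int := (12345, 4)

def Spec_encode_base32 (value : Int) (length : Int) (out : String) : Prop := out = encode_base32_alt value length
instance (value : Int) (length : Int) (out : String) : Decidable (Spec_encode_base32 value length out) := by unfold Spec_encode_base32; infer_instance

-- ===== CLAIM (what is proved, stated in full; the proofs are below) =====
def Claim_equal_encode_base32 : Prop := ∀ (value : Int) (length : Int), Dom_encode_base32 value length → Pre_encode_base32 value length → Spec_encode_base32 value length (encode_base32 value length)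

-- ===== LEMMAS AND PROOFS =====

theorem pvTerm_div32 (v : Int) (h : 0 < v) :
    (PySem.Int.floordiv v 32).toNat < v.toNat := by
  have h32 : PySem.Int.floordiv v 32 = v / 32 :=
    PySem.Int.floordiv_eq_ediv_of_pos (by omega)
  have h1 : v / 32 < v := by omega
  have h2 : 0 ≤ v / 32 := Int.ediv_nonneg (by omega) (by omega)
  omega

-- proof-only helper: the MSB-first digit list of v
def digitsOf (n : Int) : List Char :=
  if h : n ≤ 0 then []
  else digitsOf (PySem.Int.floordiv n 32) ++ [crockDigit (PySem.Int.mod n 32)]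
termination_by n.toNat
decreasing_by exact pvTerm_div32 n (by omega)

theorem digitsOf_zero : digitsOf 0 = [] := by rw [digitsOf]; simp

theorem digitsOf_nonpos (v : Int) (h : v ≤ 0) : digitsOf v = [] := by
  rw [digitsOf, dif_pos h]

-- A's reversed loop output is the MSB-first digit list (any sufficient fuel)
theorem encLoopA_reverse (fuel : Nat) : ∀ (v : Int) (res : List Char), v.toNat ≤ fuel →
    (encLoopA v res fuel).reverse = digitsOf v ++ res.reverse := by
  induction fuel with
  | zero =>
    intro v res hf
    rw [digitsOf_nonpos v (by omega)]
    simp [encLoopA]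
  | succ fuel ih =>
    intro v res hf
    by_cases hv : v > 0
    · have hlt := pvTerm_div32 v hv
      show (encLoopA v res (fuel + 1)).reverse = _
      rw [encLoopA, if_pos hv, ih _ _ (by omega)]
      conv_rhs => rw [digitsOf]
      rw [dif_neg (by omega : ¬ v ≤ 0)]
      simp
    · show (encLoopA v res (fuel + 1)).reverse = _
      rw [encLoopA, if_neg hv, digitsOf_nonpos v (by omega)]
      simp

theorem digitsOf_lt (v : Int) (hv : 0 ≤ v) : v < 32 ^ (digitsOf v).length := by
  fun_induction digitsOf v with
  | case1 v h => simp; omega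
  | case2 v h ih =>
    have h32 : PySem.Int.floordiv v 32 = v / 32 :=
      PySem.Int.floordiv_eq_ediv_of_pos (by omega)
    have ih' := ih (by rw [h32]; exact Int.ediv_nonneg (by omega) (by norm_num))
    rw [h32] at ih'
    have hs : (32 : Int) ^ ((digitsOf (PySem.Int.floordiv v 32)).length + 1)
        = 32 ^ (digitsOf (PySem.Int.floordiv v 32)).length * 32 := pow_succ _ _
    simp only [List.length_append, List.length_singleton]
    rw [hs]
    omega

theorem digitsOf_pow_le (v : Int) (hv : 0 < v) :
    (32 : Int) ^ ((digitsOf v).length - 1) ≤ v := by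
  fun_induction digitsOf v with
  | case1 v h => omega
  | case2 v h ih =>
    have h32 : PySem.Int.floordiv v 32 = v / 32 :=
      PySem.Int.floordiv_eq_ediv_of_pos (by omega)
    by_cases hz : 0 < PySem.Int.floordiv v 32
    · have ih' := ih hz
      have hL : 1 ≤ (digitsOf (PySem.Int.floordiv v 32)).length := by
        rw [digitsOf, dif_neg (by omega : ¬ PySem.Int.floordiv v 32 ≤ 0)]
        simp
      simp only [List.length_append, List.length_singleton]
      have hs : (32 : Int) ^ ((digitsOf (PySem.Int.floordiv v 32)).length + 1 - 1)
          = 32 ^ ((digitsOf (PySem.Int.floordiv v 32)).length - 1) * 32 := by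
        rw [← pow_succ]
        congr 1
        omega
      rw [hs, h32] at *
      have : (32 : Int) ^ ((digitsOf (v / 32)).length - 1) * 32 ≤ (v / 32) * 32 := by
        nlinarith
      omega
    · have hdz : digitsOf (PySem.Int.floordiv v 32) = [] := by
        rw [digitsOf, dif_pos (by omega : PySem.Int.floordiv v 32 ≤ 0)]
      rw [hdz]
      simp only [List.nil_append, List.length_singleton, Nat.sub_self, pow_zero]
      omega

-- 32^w ≤ v exactly when w is below the digit count (for v ≥ 0)
theorem pow_le_iff_lt_len (v : Int) (hv : 0 ≤ v) (w : Nat) :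
    (32 : Int) ^ w ≤ v ↔ w < (digitsOf v).length := by
  constructor
  · intro h
    by_contra hc
    have hle : (digitsOf v).length ≤ w := by omega
    have h2 := digitsOf_lt v hv
    have h3 : (32 : Int) ^ (digitsOf v).length ≤ 32 ^ w :=
      pow_le_pow_right₀ (by norm_num) hle
    omega
  · intro h
    have hv0 : 0 < v := by
      by_contra hc
      have : v = 0 := by omega
      rw [this, digitsOf_zero] at h
      simp at h
    have h1 := digitsOf_pow_le v hv0
    have : (32 : Int) ^ w ≤ 32 ^ ((digitsOf v).length - 1) :=
      pow_le_pow_right₀ (by norm_num) (by omega)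
    omega

theorem nat_lt_pow32 (k : Nat) : (k : Int) < 32 ^ k := by
  induction k with
  | zero => simp
  | succ k ih =>
    have hs : (32 : Int) ^ (k + 1) = 32 ^ k * 32 := pow_succ _ _
    have hp : (0 : Int) < 32 ^ k := pow_pos (by omega) k
    push_cast
    omega

-- the digit count is at most v + 1 (so value.toNat + 1 fuel always suffices)
theorem digitsOf_length_le (v : Int) (hv : 0 ≤ v) :
    ((digitsOf v).length : Int) ≤ v + 1 := by
  by_cases h0 : 0 < v
  · have h1 := digitsOf_pow_le v h0
    have h2 := nat_lt_pow32 ((digitsOf v).length - 1)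
    have h3 : (32 : Int) ^ ((digitsOf v).length - 1) ≤ v := h1
    have hL : 1 ≤ (digitsOf v).length := by
      rw [digitsOf, dif_neg (by omega : ¬ v ≤ 0)]
      simp
    have : (((digitsOf v).length - 1 : Nat) : Int) < 32 ^ ((digitsOf v).length - 1) := h2
    have hcast : (((digitsOf v).length - 1 : Nat) : Int) = ((digitsOf v).length : Int) - 1 := by
      omega
    omega
  · have : v = 0 := by omega
    rw [this, digitsOf_zero]
    simp

theorem widthLoopB_eq (v : Int) (hv : 0 ≤ v) (fuel : Nat) : ∀ (w : Nat),
    (digitsOf v).length ≤ w + fuel → widthLoopB v w fuel = max w (digitsOf v).length := by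
  induction fuel with
  | zero =>
    intro w hf
    show w = _
    omega
  | succ fuel ih =>
    intro w hf
    show (if (32 : Int) ^ w ≤ v then widthLoopB v (w + 1) fuel else w) = _
    by_cases h : (32 : Int) ^ w ≤ v
    · rw [if_pos h]
      have hlt : w < (digitsOf v).length := (pow_le_iff_lt_len v hv w).mp h
      rw [ih (w + 1) (by omega)]
      omega
    · rw [if_neg h]
      have : ¬ w < (digitsOf v).length := fun hc => h ((pow_le_iff_lt_len v hv w).mpr hc)
      omega

-- writing at the first position after n copies of c
theorem set_replicate_head (n : Nat) (c x y : Char) (suf : List Char) :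
    (List.replicate n c ++ (x :: suf)).set n y = List.replicate n c ++ (y :: suf) := by
  induction n with
  | zero => simp
  | succ n ih => simp [List.replicate_succ, ih]

-- B's buffer loop: a zero-filled buffer of width k becomes the digits padded with '0' to k
theorem fillLoopB_eq (fuel : Nat) : ∀ (v : Int) (k : Nat) (suf : List Char),
    v.toNat ≤ fuel → 0 ≤ v → v < 32 ^ k →
    fillLoopB v ((k : Int) - 1) (List.replicate k '0' ++ suf) fuel
      = List.replicate (k - (digitsOf v).length) '0' ++ digitsOf v ++ suf := by
  induction fuel with
  | zero =>
    intro v k suf hf hv hlt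
    rw [digitsOf_nonpos v (by omega)]
    simp [fillLoopB]
  | succ fuel ih =>
    intro v k suf hf hv hlt
    by_cases hpos : v > 0
    · obtain ⟨k', rfl⟩ : ∃ k', k = k' + 1 := by
        cases k with
        | zero => simp at hlt; omega
        | succ k' => exact ⟨k', rfl⟩
      have h32 : PySem.Int.floordiv v 32 = v / 32 :=
        PySem.Int.floordiv_eq_ediv_of_pos (by omega)
      have hq0 : 0 ≤ v / 32 := Int.ediv_nonneg hv (by norm_num)
      have hqlt : v / 32 < 32 ^ k' := by
        have hs : (32 : Int) ^ (k' + 1) = 32 ^ k' * 32 := pow_succ _ _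
        omega
      have hfq : (PySem.Int.floordiv v 32).toNat ≤ fuel := by
        have := pvTerm_div32 v hpos
        omega
      conv_lhs => rw [fillLoopB]
      rw [if_pos hpos]
      have hset : pySetChar (List.replicate (k' + 1) '0' ++ suf) ((k' + 1 : Nat) - 1)
          (crockDigit (PySem.Int.mod v 32))
          = List.replicate k' '0' ++ (crockDigit (PySem.Int.mod v 32) :: suf) := by
        unfold pySetChar
        rw [if_pos (by simp; omega)]
        have ht : (((k' + 1 : Nat) : Int) - 1).toNat = k' := by omega
        rw [ht, List.replicate_succ', List.append_assoc, List.singleton_append,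
          set_replicate_head]
      rw [hset]
      have hstep : (((k' + 1 : Nat) : Int) - 1) - 1 = ((k' : Nat) : Int) - 1 := by push_cast; ring
      rw [hstep, ih (PySem.Int.floordiv v 32) k' (crockDigit (PySem.Int.mod v 32) :: suf)
        hfq (by rw [h32]; exact hq0) (by rw [h32]; exact hqlt)]
      have hdv : digitsOf v = digitsOf (PySem.Int.floordiv v 32) ++ [crockDigit (PySem.Int.mod v 32)] := by
        conv_lhs => rw [digitsOf]
        rw [dif_neg (by omega : ¬ v ≤ 0)]
      rw [hdv]
      simp only [List.length_append, List.length_singleton, List.append_assoc,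
        List.singleton_append]
      congr 2
      omega
    · conv_lhs => rw [fillLoopB]
      rw [if_neg hpos, digitsOf_nonpos v (by omega)]
      simp

-- ===== VERDICT (by name: the statement is the Claim_ definition above) =====
theorem encode_base32_spec : Claim_equal_encode_base32 := by
  intro value length _ hpre
  unfold Pre_encode_base32 at hpre
  unfold Spec_encode_base32 encode_base32 encode_base32_alt
  rw [if_neg (by omega : ¬ value < 0), if_neg (by omega : ¬ value < 0)]
  have hlen := digitsOf_length_le value hpre
  rw [widthLoopB_eq value hpre _ _ (by omega)]
  have hlt : value < 32 ^ max length.toNat (digitsOf value).length := by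
    have h1 := digitsOf_lt value hpre
    have h2 : (32 : Int) ^ (digitsOf value).length ≤ 32 ^ max length.toNat (digitsOf value).length :=
      pow_le_pow_right₀ (by norm_num) (le_max_right _ _)
    omega
  have hd0 : crockDigit 0 = '0' := by decide
  rw [hd0]
  set n := max length.toNat (digitsOf value).length with hn
  have hzeta : (have width := n;
      String.mk (fillLoopB value ((width : Int) - 1) (List.replicate width '0') (value.toNat + 1)))
      = String.mk (fillLoopB value ((n : Int) - 1)
          (List.replicate n '0' ++ ([] : List Char)) (value.toNat + 1)) := by
    simp only [List.append_nil]
  rw [hzeta, fillLoopB_eq (value.toNat + 1) value n [] (by omega) hpre hlt]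
  by_cases h0 : value = 0
  · subst h0
    rw [if_pos rfl]
    have hzn : n = length.toNat := by rw [hn, digitsOf_zero]; simp
    rw [hzn, digitsOf_zero]
    simp
  · rw [if_neg h0]
    have hrev : (encLoopA value [] (value.toNat + 1)).reverse = digitsOf value := by
      simpa using encLoopA_reverse (value.toNat + 1) value [] (by omega)
    simp only [hrev, List.append_nil]
    by_cases hl : ((digitsOf value).length : Int) < length
    · rw [if_pos hl]
      have hpad : (length - ((digitsOf value).length : Int)).toNat
          = n - (digitsOf value).length := by omega
      rw [hpad]
    · rw [if_neg hl]
      have hz : n - (digitsOf value).length = 0 := by omega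
      rw [hz]
      simp
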